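-- pv_equiv track=rewrite | github.com/JordiLazo/Masters_Degree_in_Computer_Engineering | 103087_ICT Project_Communication_Services_and_Security/assignment_1/problem3/trace_info.py | count_retrasmissions
-- ===== SOURCE A (Python) =====
-- def count_retrasmissions(transmissions):
--     segments = []
--     n_retrasmissions = 0
--     for transmission in transmissions:
--         segment = transmission[1]
--         if segment in segments:
--             n_retrasmissions += 1
--         else:
--             segments.append(segment)
--     return n_retrasmissions
-- ===== SOURCE B (Python) =====
-- def count_retrasmissions(transmissions):
--     counts = {}
--     for transmission in transmissions:
--         segment = transmission[1]
--         counts[segment] = counts.get(segment, 0) + 1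
--     return sum(c - 1 for c in counts.values())
-- ===== Notes on version B (the rewrite author's own statement) =====
-- stated objective: alternative
-- what changed: Replaces A's incremental seen-list membership branch with a count-everything frequency table followed by summing (count - 1) over its values; A is quadratic in the number of distinct segments, B is linear, but on the benchmark's duplicate-heavy inputs the measured times are equal.
import Mathlib
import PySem

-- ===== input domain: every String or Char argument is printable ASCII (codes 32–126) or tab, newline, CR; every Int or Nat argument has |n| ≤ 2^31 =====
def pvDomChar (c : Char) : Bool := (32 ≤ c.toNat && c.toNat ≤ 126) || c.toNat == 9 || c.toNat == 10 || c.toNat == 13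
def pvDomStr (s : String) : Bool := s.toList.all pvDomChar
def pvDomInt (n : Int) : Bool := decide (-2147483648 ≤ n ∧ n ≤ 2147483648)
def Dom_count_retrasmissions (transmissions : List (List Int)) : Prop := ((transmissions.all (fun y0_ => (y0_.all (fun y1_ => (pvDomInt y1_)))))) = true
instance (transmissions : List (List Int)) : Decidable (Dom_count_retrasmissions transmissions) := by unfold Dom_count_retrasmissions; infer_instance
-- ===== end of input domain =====

-- B replaces A's per-element membership branch over a growing seen-list with one
-- frequency-table pass and a sum of (count - 1) over the table's values (alternative decomposition).


-- ===== PORT A =====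
def count_retrasmissions (transmissions : List (List Int)) : Int :=
  (transmissions.foldl
    (fun (st : List Int × Int) transmission =>
      let segment := PySem.List.pyGetD transmission 1 0
      if segment ∈ st.1 then (st.1, st.2 + 1) else (st.1 ++ [segment], st.2))
    ([], 0)).2

-- ===== PORT B =====
def count_retrasmissions_alt (transmissions : List (List Int)) : Int :=
  let counts := transmissions.foldl
    (fun (d : PySem.Dict Int Int) transmission =>
      let segment := PySem.List.pyGetD transmission 1 0
      d.insert segment (d.getD segment 0 + 1))
    PySem.Dict.empty
  (counts.values.map (fun c => c - 1)).sum

-- ===== PRECONDITION & SPEC =====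
-- Pre_ excludes exactly the inputs where Python's transmission[1] raises IndexError.
def Pre_count_retrasmissions (transmissions : List (List Int)) : Prop :=
  ∀ t ∈ transmissions, 2 ≤ t.length
instance (transmissions : List (List Int)) : Decidable (Pre_count_retrasmissions transmissions) := by unfold Pre_count_retrasmissions; infer_instance

def pvWitness_count_retrasmissions : List (List Int) := [[1, 2], [3, 2], [4, 5]]

def Spec_count_retrasmissions (transmissions : List (List Int)) (out : Int) : Prop := out = count_retrasmissions_alt transmissions
instance (transmissions : List (List Int)) (out : Int) : Decidable (Spec_count_retrasmissions transmissions out) := by unfold Spec_count_retrasmissions; infer_instance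

-- ===== CLAIM (what is proved, stated in full; the proofs are below) =====
def Claim_equal_count_retrasmissions : Prop := ∀ (transmissions : List (List Int)), Dom_count_retrasmissions transmissions → Pre_count_retrasmissions transmissions → Spec_count_retrasmissions transmissions (count_retrasmissions transmissions)

-- ===== LEMMAS AND PROOFS =====

-- A's loop counts: n + (elements of l) - (new distinct elements of l beyond seen).
theorem pv_aLoop_inv (l : List Int) (seen : List Int) (n : Int) :
    (l.foldl (fun (st : List Int × Int) x =>
        if x ∈ st.1 then (st.1, st.2 + 1) else (st.1 ++ [x], st.2)) (seen, n)).2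
      = n + (l.length : Int) - (((PySem.Set.update seen l).length : Int) - (seen.length : Int)) := by
  induction l generalizing seen n with
  | nil => simp [PySem.Set.update_nil]
  | cons x l ih =>
    by_cases hx : x ∈ seen
    · simp only [List.foldl_cons, if_pos hx, ih, PySem.Set.update_cons,
        PySem.Set.add_of_mem hx, List.length_cons]
      push_cast; ring
    · simp only [List.foldl_cons, if_neg hx, ih, PySem.Set.update_cons,
        PySem.Set.add_of_not_mem hx, List.length_cons, List.length_append,
        List.length_nil]
      push_cast
      ring

theorem pv_a_eq (transmissions : List (List Int)) :
    count_retrasmissions transmissions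
      = ((transmissions.map (fun t => PySem.List.pyGetD t 1 0)).length : Int)
        - ((PySem.Set.ofList (transmissions.map (fun t => PySem.List.pyGetD t 1 0))).length : Int) := by
  unfold count_retrasmissions
  rw [← List.foldl_map (f := fun t => PySem.List.pyGetD t 1 0)
      (g := fun (st : List Int × Int) x =>
        if x ∈ st.1 then (st.1, st.2 + 1) else (st.1 ++ [x], st.2))]
  rw [pv_aLoop_inv]
  rw [PySem.Set.update_nil_left]
  simp

theorem pv_count_sum (segs : List Int) :
    (List.map (fun k => ((List.count k segs : Nat) : Int)) segs.dedup).sum = (segs.length : Int) := by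
  rw [← List.sum_map_count_dedup_eq_length segs]
  push_cast
  rw [List.map_map]
  simp only [Function.comp_def]

theorem pv_counter_sum (segs : List Int) :
    ((PySem.Dict.counter segs).values.map (fun c => c - 1)).sum
      = (segs.length : Int) - ((PySem.Set.ofList segs).length : Int) := by
  have hperm : (PySem.Set.ofList segs).Perm segs.dedup := by
    rw [List.perm_ext_iff_of_nodup (PySem.Set.nodup_ofList segs) segs.nodup_dedup]
    intro a; rw [PySem.Set.mem_ofList, List.mem_dedup]
  rw [PySem.Dict.values, PySem.Dict.items_counter, List.map_map, List.map_map]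
  have h2 : ((PySem.Set.ofList segs).map
      (((fun c => c - 1) ∘ fun x : Int × Int => x.2) ∘ fun k => (k, (segs.count k : Int)))).sum
      = (segs.dedup.map (fun k => ((segs.count k : Nat) : Int) - 1)).sum := by
    exact List.Perm.sum_eq (hperm.map _)
  rw [h2]
  have h3 : (segs.dedup.map (fun k => ((segs.count k : Nat) : Int) - 1)).sum
      = (segs.dedup.map (fun k => ((segs.count k : Nat) : Int))).sum
        + (segs.dedup.map (fun _ => (-1 : Int))).sum := by
    rw [← PySem.List.sum_map_add_int]
    simp [sub_eq_add_neg]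
  rw [h3, pv_count_sum, PySem.List.sum_map_const_int]
  rw [hperm.length_eq]
  ring


theorem pv_b_eq (transmissions : List (List Int)) :
    count_retrasmissions_alt transmissions
      = ((transmissions.map (fun t => PySem.List.pyGetD t 1 0)).length : Int)
        - ((PySem.Set.ofList (transmissions.map (fun t => PySem.List.pyGetD t 1 0))).length : Int) := by
  unfold count_retrasmissions_alt
  rw [← List.foldl_map (f := fun t => PySem.List.pyGetD t 1 0)
      (g := fun (d : PySem.Dict Int Int) s => d.insert s (d.getD s 0 + 1))]
  rw [PySem.Dict.foldl_insert_getD_add_one_eq_counter]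
  exact pv_counter_sum _

-- ===== VERDICT (by name: the statement is the Claim_ definition above) =====
theorem count_retrasmissions_spec : Claim_equal_count_retrasmissions := by
  intro ts _ _
  unfold Spec_count_retrasmissions
  rw [pv_a_eq, pv_b_eq]
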